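-- pv_equiv track=rewrite | github.com/GateStainer/LstmLgBackend | LstmLgBackend/SCLSTM4Integrate/data_reader.py | load_token_to_id
-- ===== SOURCE A (Python) =====
-- from operator import itemgetter
--
-- def split_text(line):
--     ret = []
--     line = line.strip()
--     if len(line) == 0:
--         return ret
--     space = [-1]
--     in_brace = False
--     cnt = 0
--     while cnt < len(line):
--         ch = line[cnt]
--         if ch == '{':
--             in_brace = True
--             cnt += 1
--             continue
--         elif ch == '}':
--             in_brace = False
--             cnt += 1
--             continue
--         if ch == ' ' and in_brace == False:
--             space.append(cnt)
--         cnt += 1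
--     space.append(len(line))
--     cnt = 0
--     while cnt + 1 < len(space):
--         part = line[space[cnt] + 1: space[cnt + 1]].strip()
--         if len(part) > 0:
--             ret.append(part)
--         cnt += 1
--     return ret
--
-- def load_token_to_id(lines):
--     id_to_token = {}
--     token_to_id = {}
--     token_all = {}
--     cnt = 0
--     while cnt < len(lines):
--         temp = lines[cnt].strip()
--         #for mark in special_mark:
--         #    temp = temp.replace(mark, ' ' + mark)
--         #words = temp.split()
--         words = split_text(temp)
--
--         for e in words:
--             e = e.strip()
--             if e in token_all:
--                 token_all[e] += 1
--             else:
--                 token_all[e] = 1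
--         cnt += 1
--
--     token_dic = sorted(token_all.items(), key=itemgetter(1), reverse=True)
--     token_to_id['<unk>'] = 0
--     id_to_token[0] = '<unk>'
--     token_to_id['<eos>'] = 1
--     id_to_token[1] = '<eos>'
--     token_to_id['<bos>'] = 2
--     id_to_token[2] = '<bos>'
--     word_cnt = 3
--     for e in token_dic:
--         token_to_id[e[0].strip()] = word_cnt
--         id_to_token[word_cnt] = e[0].strip()
--         #fw_token.write(e[0].strip() + '\t' + str(word_cnt) + '\n')
--         word_cnt += 1
--     vocab_dim = len(token_to_id)
--
--     return token_to_id, id_to_token, vocab_dim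
-- ===== SOURCE B (Python) =====
-- # B: single-pass streaming tokenizer (brace-aware) instead of A's two-pass
-- # collect-space-positions-then-slice, and Counter + enumerate instead of
-- # index-while loops; objective: simpler/idiomatic, same results.
-- from collections import Counter
--
--
-- def _tokens(line):
--     toks, buf, in_brace = [], [], False
--     for ch in line.strip():
--         if ch == '{':
--             in_brace = True
--             buf.append(ch)
--         elif ch == '}':
--             in_brace = False
--             buf.append(ch)
--         elif ch == ' ' and not in_brace:
--             toks.append(buf)
--             buf = []
--         else:
--             buf.append(ch)
--     toks.append(buf)
--     out = []
--     for t in toks: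
--         w = ''.join(t).strip()
--         if w:
--             out.append(w)
--     return out
--
--
-- def load_token_to_id(lines):
--     counts = Counter(tok for line in lines for tok in _tokens(line))
--     token_to_id = {'<unk>': 0, '<eos>': 1, '<bos>': 2}
--     id_to_token = {0: '<unk>', 1: '<eos>', 2: '<bos>'}
--     for i, (tok, _) in enumerate(sorted(counts.items(), key=lambda kv: kv[1], reverse=True), 3):
--         token_to_id[tok] = i
--         id_to_token[i] = tok
--     return token_to_id, id_to_token, len(token_to_id)
-- ===== Notes on version B (the rewrite author's own statement) =====
-- stated objective: idiomatic
-- what changed: split_text becomes a single-pass streaming tokenizer with an in-brace flag (instead of collecting space positions and then slicing between them), and the counting uses collections.Counter over a flattened token stream with enumerate-based id assignment instead of index-while loops with a manual membership-test counter.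
import Mathlib
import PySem

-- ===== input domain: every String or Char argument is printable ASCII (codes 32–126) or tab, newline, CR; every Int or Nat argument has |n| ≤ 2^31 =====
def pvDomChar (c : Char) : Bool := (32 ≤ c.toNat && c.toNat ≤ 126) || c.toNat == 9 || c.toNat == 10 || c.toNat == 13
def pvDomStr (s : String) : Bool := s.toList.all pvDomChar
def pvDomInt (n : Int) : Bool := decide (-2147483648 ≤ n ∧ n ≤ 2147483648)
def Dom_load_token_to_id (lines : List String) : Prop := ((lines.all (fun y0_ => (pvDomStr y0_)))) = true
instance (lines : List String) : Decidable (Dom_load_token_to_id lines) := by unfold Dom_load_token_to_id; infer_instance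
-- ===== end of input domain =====

-- B replaces A's two-pass split (collect space positions, then slice) by a one-pass
-- streaming tokenizer and the manual counting/id loops by Counter + enumerate; objective: idiomatic.

-- ===== PORT A =====
-- first while of split_text: walk the chars with an index, collecting out-of-brace space positions
def splitLoop1A : List Char → Int → List Int → Bool → List Int
  | [], _cnt, space, _inb => space
  | ch :: rest, cnt, space, inb =>
    if ch = '{' then splitLoop1A rest (cnt + 1) space true
    else if ch = '}' then splitLoop1A rest (cnt + 1) space false
    else if ch = ' ' ∧ inb = false then splitLoop1A rest (cnt + 1) (space ++ [cnt]) inb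
    else splitLoop1A rest (cnt + 1) space inb

-- second while of split_text: slice between consecutive recorded positions, strip, keep non-empty
def splitLoop2A (line : List Char) : List Int → List String → List String
  | a :: b :: rest, ret =>
    let part := PySem.Chars.strip (PySem.List.slice line (some (a + 1)) (some b))
    splitLoop2A line (b :: rest) (if part.length > 0 then ret ++ [String.ofList part] else ret)
  | _, ret => ret

def split_text_A (line : String) : List String :=
  let cs := PySem.Chars.strip line.toList
  if cs.length = 0 then []
  else splitLoop2A cs (splitLoop1A cs 0 [-1] false ++ [(cs.length : Int)]) []

-- the while loop over lines, with the inner 'for e in words' counting loop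
def countLoopA : List String → PySem.Dict String Int → PySem.Dict String Int
  | [], d => d
  | l :: ls, d =>
    let words := split_text_A (PySem.Str.strip l)
    countLoopA ls (words.foldl
      (fun d e =>
        let e := PySem.Str.strip e
        if d.contains e then d.modify e 0 (· + 1) else d.insert e 1) d)

def load_token_to_id (lines : List String) : (List (String × Int)) × (List (Int × String)) × Int :=
  let token_all := countLoopA lines PySem.Dict.empty
  let token_dic := PySem.List.sorted token_all.items (fun e => e.2) true
  let token_to_id : PySem.Dict String Int :=
    ((PySem.Dict.empty.insert "<unk>" 0).insert "<eos>" 1).insert "<bos>" 2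
  let id_to_token : PySem.Dict Int String :=
    ((PySem.Dict.empty.insert 0 "<unk>").insert 1 "<eos>").insert 2 "<bos>"
  let st := token_dic.foldl
    (fun (st : PySem.Dict String Int × PySem.Dict Int String × Int) e =>
      (st.1.insert (PySem.Str.strip e.1) st.2.2, st.2.1.insert st.2.2 (PySem.Str.strip e.1), st.2.2 + 1))
    (token_to_id, id_to_token, 3)
  (st.1.items, st.2.1.items, (st.1.items.length : Int))

-- ===== PORT B =====
-- one-pass streaming tokenizer: buffer chars, toggle the brace flag, flush on out-of-brace spaces
def tokStep (st : List (List Char) × List Char × Bool) (ch : Char) : List (List Char) × List Char × Bool :=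
  if ch = '{' then (st.1, st.2.1 ++ [ch], true)
  else if ch = '}' then (st.1, st.2.1 ++ [ch], false)
  else if ch = ' ' ∧ st.2.2 = false then (st.1 ++ [st.2.1], [], st.2.2)
  else (st.1, st.2.1 ++ [ch], st.2.2)

def tokensB (line : String) : List String :=
  let st := (PySem.Chars.strip line.toList).foldl tokStep ([], [], false)
  (st.1 ++ [st.2.1]).foldl
    (fun out t =>
      let w := PySem.Chars.strip t
      if w ≠ [] then out ++ [String.ofList w] else out) []

def load_token_to_id_alt (lines : List String) : (List (String × Int)) × (List (Int × String)) × Int :=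
  let counts := PySem.Dict.counter (lines.flatMap tokensB)
  let token_to_id : PySem.Dict String Int :=
    PySem.Dict.ofList [("<unk>", 0), ("<eos>", 1), ("<bos>", 2)]
  let id_to_token : PySem.Dict Int String :=
    PySem.Dict.ofList [(0, "<unk>"), (1, "<eos>"), (2, "<bos>")]
  let st := (PySem.List.enumerate (PySem.List.sorted counts.items (fun kv => kv.2) true) 3).foldl
    (fun (st : PySem.Dict String Int × PySem.Dict Int String) p =>
      (st.1.insert p.2.1 p.1, st.2.insert p.1 p.2.1)) (token_to_id, id_to_token)
  (st.1.items, st.2.items, (st.1.size : Int))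

-- ===== PRECONDITION & SPEC =====
def Spec_load_token_to_id (lines : List String) (out : (List (String × Int)) × (List (Int × String)) × Int) : Prop := out = load_token_to_id_alt lines
instance (lines : List String) (out : (List (String × Int)) × (List (Int × String)) × Int) : Decidable (Spec_load_token_to_id lines out) := by unfold Spec_load_token_to_id; infer_instance

-- ===== CLAIM (what is proved, stated in full; the proofs are below) =====
def Claim_equal_load_token_to_id : Prop := ∀ (lines : List String), Dom_load_token_to_id lines → Spec_load_token_to_id lines (load_token_to_id lines)

-- ===== LEMMAS AND PROOFS =====

-- relative positions of the out-of-brace spaces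
def poss : List Char → Bool → List Nat
  | [], _ => []
  | c :: cs, inb =>
    if c = '{' then (poss cs true).map (· + 1)
    else if c = '}' then (poss cs false).map (· + 1)
    else if c = ' ' ∧ inb = false then 0 :: (poss cs inb).map (· + 1)
    else (poss cs inb).map (· + 1)

def consHead (c : Char) : List (List Char) → List (List Char)
  | [] => [[c]]
  | h :: t => (c :: h) :: t

-- the raw segments between out-of-brace spaces
def segs : List Char → Bool → List (List Char)
  | [], _ => [[]]
  | c :: cs, inb =>
    if c = '{' then consHead c (segs cs true)
    else if c = '}' then consHead c (segs cs false)
    else if c = ' ' ∧ inb = false then [] :: segs cs inb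
    else consHead c (segs cs inb)

def seg (cs : List Char) (s p : Nat) : List Char := (cs.drop s).take (p - s)

def rawParts (cs : List Char) : Nat → List Nat → List (List Char)
  | _, [] => []
  | s, p :: ps => seg cs s p :: rawParts cs (p + 1) ps

def procList (l : List (List Char)) : List String :=
  (l.filter (fun t => decide (PySem.Chars.strip t ≠ []))).map
    (fun t => String.ofList (PySem.Chars.strip t))

def glue (buf : List Char) : List (List Char) → List (List Char)
  | [] => [buf]
  | h :: t => (buf ++ h) :: t

lemma dw_prefix (p : Char → Bool) (r t : List Char) (hr : List.dropWhile p r = r)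
    (ht : t <+: r) : List.dropWhile p t = t := by
  cases t with
  | nil => simp
  | cons c t' =>
    have hc : p c = false := by
      obtain ⟨u, hu⟩ := ht
      by_contra h
      have hpc : p c = true := by simpa using h
      subst hu
      have hstep : List.dropWhile p (c :: (t' ++ u)) = List.dropWhile p (t' ++ u) := by
        simp [hpc]
      simp only [List.cons_append] at hr
      rw [hr] at hstep
      have hlen := List.length_dropWhile_le (p := p) (l := t' ++ u)
      rw [← hstep] at hlen
      simp at hlen
    simp [hc]

lemma rstrip_prefix (r : List Char) : PySem.Chars.rstrip r <+: r := by
  have h := List.dropWhile_suffix (p := PySem.Chars.isspace) (l := r.reverse)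
  unfold PySem.Chars.rstrip
  exact List.reverse_suffix.mp (by simpa using h)

lemma strip_idem (x : List Char) :
    PySem.Chars.strip (PySem.Chars.strip x) = PySem.Chars.strip x := by
  unfold PySem.Chars.strip
  have ha : List.dropWhile PySem.Chars.isspace (PySem.Chars.lstrip x) = PySem.Chars.lstrip x := by
    unfold PySem.Chars.lstrip
    apply List.dropWhile_idempotent
  have h1 : PySem.Chars.lstrip (PySem.Chars.rstrip (PySem.Chars.lstrip x))
      = PySem.Chars.rstrip (PySem.Chars.lstrip x) := by
    unfold PySem.Chars.lstrip
    exact dw_prefix _ _ _ ha (rstrip_prefix _)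
  rw [h1]
  unfold PySem.Chars.rstrip
  rw [List.reverse_reverse]
  rw [List.dropWhile_idempotent]

lemma mapshift (cnt : Int) (P : List Nat) :
    (P.map (· + 1)).map (fun (k : Nat) => cnt + (k : Int)) = P.map (fun (k : Nat) => (cnt + 1) + (k : Int)) := by
  rw [List.map_map]
  apply List.map_congr_left
  intro a _
  show cnt + ((a + 1 : Nat) : Int) = (cnt + 1) + (a : Int)
  push_cast
  ring

lemma L1 (ds : List Char) : ∀ (inb : Bool) (cnt : Int) (space : List Int),
    splitLoop1A ds cnt space inb
      = space ++ (poss ds inb).map (fun (k : Nat) => cnt + (k : Int)) := by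
  induction ds with
  | nil => intro inb cnt space; simp [splitLoop1A, poss]
  | cons c cs ih =>
    intro inb cnt space
    by_cases h1 : c = '{'
    · rw [show splitLoop1A (c :: cs) cnt space inb = splitLoop1A cs (cnt + 1) space true from by
        simp [splitLoop1A, h1]]
      rw [ih, show poss (c :: cs) inb = (poss cs true).map (· + 1) from by simp [poss, h1]]
      rw [mapshift]
    · by_cases h2 : c = '}'
      · rw [show splitLoop1A (c :: cs) cnt space inb = splitLoop1A cs (cnt + 1) space false from by
          simp [splitLoop1A, h1, h2]]
        rw [ih, show poss (c :: cs) inb = (poss cs false).map (· + 1) from by simp [poss, h1, h2]]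
        rw [mapshift]
      · by_cases h3 : c = ' ' ∧ inb = false
        · rw [show splitLoop1A (c :: cs) cnt space inb
              = splitLoop1A cs (cnt + 1) (space ++ [cnt]) inb from by
            simp [splitLoop1A, h1, h2, h3]]
          rw [ih, show poss (c :: cs) inb = 0 :: (poss cs inb).map (· + 1) from by
            simp [poss, h1, h2, h3]]
          rw [List.map_cons, mapshift]
          simp
        · rw [show splitLoop1A (c :: cs) cnt space inb = splitLoop1A cs (cnt + 1) space inb from by
            simp [splitLoop1A, h1, h2, h3]]
          rw [ih, show poss (c :: cs) inb = (poss cs inb).map (· + 1) from by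
            simp [poss, h1, h2, h3]]
          rw [mapshift]

lemma SHIFT (c : Char) (ds : List Char) (ps : List Nat) : ∀ (s : Nat),
    rawParts (c :: ds) (s + 1) (ps.map (· + 1)) = rawParts ds s ps := by
  induction ps with
  | nil => intro s; simp [rawParts]
  | cons p ps ih =>
    intro s
    simp [rawParts, seg, Nat.succ_sub_succ, ih]

lemma CONS (c : Char) (ds : List Char) (ps : List Nat) (h : ps ≠ []) :
    rawParts (c :: ds) 0 (ps.map (· + 1)) = consHead c (rawParts ds 0 ps) := by
  cases ps with
  | nil => exact absurd rfl h
  | cons p ps' =>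
    have h2 := SHIFT c ds ps' (p + 1)
    simp only [List.map_cons, rawParts, consHead]
    rw [h2]
    congr 1

lemma M (ds : List Char) : ∀ (inb : Bool),
    rawParts ds 0 (poss ds inb ++ [ds.length]) = segs ds inb := by
  induction ds with
  | nil => intro inb; simp [poss, rawParts, segs, seg]
  | cons c cs ih =>
    intro inb
    have hmap : ∀ (P : List Nat), P.map (· + 1) ++ [cs.length + 1]
        = (P ++ [cs.length]).map (· + 1) := by
      intro P; simp
    by_cases h1 : c = '{'
    · rw [show poss (c :: cs) inb = (poss cs true).map (· + 1) from by simp [poss, h1],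
          show segs (c :: cs) inb = consHead c (segs cs true) from by simp [segs, h1],
          show (c :: cs).length = cs.length + 1 from rfl,
          hmap, CONS c cs _ (by simp), ih]
    · by_cases h2 : c = '}'
      · rw [show poss (c :: cs) inb = (poss cs false).map (· + 1) from by simp [poss, h1, h2],
            show segs (c :: cs) inb = consHead c (segs cs false) from by simp [segs, h1, h2],
            show (c :: cs).length = cs.length + 1 from rfl,
            hmap, CONS c cs _ (by simp), ih]
      · by_cases h3 : c = ' ' ∧ inb = false
        · rw [show poss (c :: cs) inb = 0 :: (poss cs inb).map (· + 1) from by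
              simp [poss, h1, h2, h3],
            show segs (c :: cs) inb = [] :: segs cs inb from by simp [segs, h1, h2, h3],
            show (c :: cs).length = cs.length + 1 from rfl]
          rw [show (0 :: (poss cs inb).map (· + 1)) ++ [cs.length + 1]
              = 0 :: ((poss cs inb).map (· + 1) ++ [cs.length + 1]) from rfl]
          rw [show rawParts (c :: cs) 0 (0 :: ((poss cs inb).map (· + 1) ++ [cs.length + 1]))
              = seg (c :: cs) 0 0
                :: rawParts (c :: cs) 1 ((poss cs inb).map (· + 1) ++ [cs.length + 1]) from rfl]
          rw [hmap]
          have hs := SHIFT c cs (poss cs inb ++ [cs.length]) 0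
          rw [show (0 : Nat) + 1 = 1 from rfl] at hs
          rw [hs, ih]
          simp [seg]
        · rw [show poss (c :: cs) inb = (poss cs inb).map (· + 1) from by
              simp [poss, h1, h2, h3],
            show segs (c :: cs) inb = consHead c (segs cs inb) from by simp [segs, h1, h2, h3],
            show (c :: cs).length = cs.length + 1 from rfl,
            hmap, CONS c cs _ (by simp), ih]

lemma procList_cons (x : List Char) (l : List (List Char)) :
    procList (x :: l)
      = (if PySem.Chars.strip x ≠ [] then [String.ofList (PySem.Chars.strip x)] else [])
          ++ procList l := by
  by_cases h : PySem.Chars.strip x = [] <;> simp [procList, List.filter_cons, h]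

lemma L2 (cs : List Char) (ps : List Nat) : ∀ (s : Nat) (ret : List String),
    splitLoop2A cs (((s : Int) - 1) :: ps.map (fun (k : Nat) => (k : Int))) ret
      = ret ++ procList (rawParts cs s ps) := by
  induction ps with
  | nil => intro s ret; simp [splitLoop2A, rawParts, procList]
  | cons p ps ih =>
    intro s ret
    simp only [List.map_cons, splitLoop2A]
    have hadd : (s : Int) - 1 + 1 = ((s : Nat) : Int) := by ring
    rw [hadd, PySem.List.slice_natCast]
    have hp : ((p : Nat) : Int) = (((p + 1 : Nat) : Int)) - 1 := by push_cast; ring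
    rw [hp, ih (p + 1)]
    rw [show rawParts cs s (p :: ps) = seg cs s p :: rawParts cs (p + 1) ps from rfl]
    rw [procList_cons]
    by_cases hx : PySem.Chars.strip (seg cs s p) = []
    · have : ¬ 0 < (PySem.Chars.strip ((cs.drop s).take (p - s))).length := by
        rw [show (cs.drop s).take (p - s) = seg cs s p from rfl, hx]; simp
      simp [seg] at hx ⊢
      simp [hx, this]
    · have hlen : 0 < (PySem.Chars.strip ((cs.drop s).take (p - s))).length := by
        rw [show (cs.drop s).take (p - s) = seg cs s p from rfl]
        exact List.length_pos_iff.mpr hx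
      simp only [seg] at hx ⊢
      simp [hx, hlen, List.append_assoc]

lemma consHead_ne_nil (c : Char) (l : List (List Char)) : consHead c l ≠ [] := by
  cases l <;> simp [consHead]

lemma segs_ne_nil (ds : List Char) (inb : Bool) : segs ds inb ≠ [] := by
  cases ds with
  | nil => simp [segs]
  | cons c cs =>
    simp only [segs]
    split_ifs <;> first | exact consHead_ne_nil _ _ | simp

lemma FOLDB (cs : List Char) : ∀ (toks : List (List Char)) (buf : List Char) (inb : Bool),
    (cs.foldl tokStep (toks, buf, inb)).1 ++ [(cs.foldl tokStep (toks, buf, inb)).2.1]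
      = toks ++ glue buf (segs cs inb) := by
  induction cs with
  | nil => intro toks buf inb; simp [segs, glue]
  | cons c cs ih =>
    intro toks buf inb
    rw [List.foldl_cons]
    by_cases h1 : c = '{'
    · rw [show tokStep (toks, buf, inb) c = (toks, buf ++ [c], true) by simp [tokStep, h1]]
      rw [ih]
      obtain ⟨h, t, hseg⟩ : ∃ h t, segs cs true = h :: t := by
        cases hs : segs cs true with
        | nil => exact absurd hs (segs_ne_nil _ _)
        | cons h t => exact ⟨h, t, rfl⟩
      simp [segs, h1, hseg, glue, consHead]
    · by_cases h2 : c = '}'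
      · rw [show tokStep (toks, buf, inb) c = (toks, buf ++ [c], false) by simp [tokStep, h1, h2]]
        rw [ih]
        obtain ⟨h, t, hseg⟩ : ∃ h t, segs cs false = h :: t := by
          cases hs : segs cs false with
          | nil => exact absurd hs (segs_ne_nil _ _)
          | cons h t => exact ⟨h, t, rfl⟩
        simp [segs, h1, h2, hseg, glue, consHead]
      · by_cases h3 : c = ' ' ∧ inb = false
        · obtain ⟨hc, hb⟩ := h3
          subst hb
          rw [show tokStep (toks, buf, false) c = (toks ++ [buf], [], false) by
            simp [tokStep, h1, h2, hc]]
          rw [ih]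
          obtain ⟨h, t, hseg⟩ : ∃ h t, segs cs false = h :: t := by
            cases hs : segs cs false with
            | nil => exact absurd hs (segs_ne_nil _ _)
            | cons h t => exact ⟨h, t, rfl⟩
          simp [segs, h1, h2, hc, hseg, glue]
        · rw [show tokStep (toks, buf, inb) c = (toks, buf ++ [c], inb) by
            simp [tokStep, h1, h2, h3]]
          rw [ih]
          obtain ⟨h, t, hseg⟩ : ∃ h t, segs cs inb = h :: t := by
            cases hs : segs cs inb with
            | nil => exact absurd hs (segs_ne_nil _ _)
            | cons h t => exact ⟨h, t, rfl⟩
          simp [segs, h1, h2, h3, hseg, glue, consHead]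

lemma tokensB_eq (line : String) :
    tokensB line = procList (segs (PySem.Chars.strip line.toList) false) := by
  unfold tokensB
  simp only []
  rw [PySem.List.foldl_append_ite (p := fun t => PySem.Chars.strip t ≠ [])
    (f := fun t => String.ofList (PySem.Chars.strip t))]
  rw [FOLDB _ [] [] false]
  obtain ⟨h, t, hseg⟩ : ∃ h t, segs (PySem.Chars.strip line.toList) false = h :: t := by
    cases hs : segs (PySem.Chars.strip line.toList) false with
    | nil => exact absurd hs (segs_ne_nil _ _)
    | cons h t => exact ⟨h, t, rfl⟩
  rw [hseg]
  simp [glue, procList]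

lemma splitA_eq (l : String) : split_text_A (PySem.Str.strip l) = tokensB l := by
  unfold split_text_A
  have htl : (PySem.Str.strip l).toList = PySem.Chars.strip l.toList := by
    unfold PySem.Str.strip; simp
  rw [htl, strip_idem]
  set cs := PySem.Chars.strip l.toList with hcs
  rw [tokensB_eq]
  rw [← hcs]
  by_cases h0 : cs.length = 0
  · have : cs = [] := List.length_eq_zero_iff.mp h0
    simp [h0, this, segs, procList, PySem.Chars.strip, PySem.Chars.lstrip, PySem.Chars.rstrip]
  · simp only [h0, if_false]
    rw [L1]
    have hsp : [(-1 : Int)] ++ (poss cs false).map (fun (k : Nat) => (0 : Int) + (k : Int))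
        ++ [(cs.length : Int)]
        = (((0 : Nat) : Int) - 1) :: ((poss cs false ++ [cs.length]).map (fun (k : Nat) => (k : Int))) := by
      simp
    rw [hsp, L2, M]
    simp

lemma tok_fix_one (l : String) : ∀ s ∈ tokensB l, PySem.Str.strip s = s := by
  intro s hs
  rw [tokensB_eq] at hs
  simp only [procList, List.mem_map] at hs
  obtain ⟨t, _, rfl⟩ := hs
  unfold PySem.Str.strip
  simp [strip_idem]

lemma COUNT (lines : List String) : ∀ (d : PySem.Dict String Int),
    countLoopA lines d
      = (lines.flatMap tokensB).foldl (fun d x => d.modify x 0 (· + 1)) d := by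
  induction lines with
  | nil => intro d; simp [countLoopA]
  | cons l ls ih =>
    intro d
    rw [show countLoopA (l :: ls) d = countLoopA ls
      ((split_text_A (PySem.Str.strip l)).foldl
        (fun d e =>
          let e := PySem.Str.strip e
          if d.contains e then d.modify e 0 (· + 1) else d.insert e 1) d) from rfl]
    rw [splitA_eq, ih]
    rw [List.flatMap_cons, List.foldl_append]
    congr 1
    apply PySem.List.foldl_congr_mem
    intro acc x hx
    simp only [tok_fix_one l x hx]
    by_cases hc : acc.contains x
    · simp [hc, PySem.Dict.modify]
    · have hb : acc.contains x = false := by simpa using hc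
      simp [hc, PySem.Dict.modify, PySem.Dict.getD_of_not_contains _ _ hb]

lemma enumFold (l : List (String × Int)) :
    ∀ (s : Int) (a : PySem.Dict String Int) (b : PySem.Dict Int String),
    l.foldl (fun st e => (st.1.insert e.1 st.2.2, st.2.1.insert st.2.2 e.1, st.2.2 + 1)) (a, b, s)
      = (((PySem.List.enumerate l s).foldl
            (fun st p => (st.1.insert p.2.1 p.1, st.2.insert p.1 p.2.1)) (a, b)).1,
         ((PySem.List.enumerate l s).foldl
            (fun st p => (st.1.insert p.2.1 p.1, st.2.insert p.1 p.2.1)) (a, b)).2,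
         s + l.length) := by
  induction l with
  | nil => intro s a b; simp [PySem.List.enumerate]
  | cons e l ih =>
    intro s a b
    rw [List.foldl_cons, PySem.List.enumerate_cons, List.foldl_cons]
    rw [ih]
    simp only [List.length_cons]
    refine Prod.ext rfl (Prod.ext rfl ?_)
    push_cast
    ring

-- ===== VERDICT (by name: the statement is the Claim_ definition above) =====
theorem load_token_to_id_spec : Claim_equal_load_token_to_id := by
  intro lines _
  unfold Spec_load_token_to_id load_token_to_id load_token_to_id_alt
  simp only []
  have hcnt : countLoopA lines PySem.Dict.empty
      = PySem.Dict.counter (lines.flatMap tokensB) := by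
    rw [COUNT, PySem.Dict.counter_eq_foldl]
  rw [hcnt]
  set stream := lines.flatMap tokensB with hstream
  set T := PySem.List.sorted (PySem.Dict.counter stream).items (fun e => e.2) true with hT
  have hfix : ∀ e ∈ T, PySem.Str.strip e.1 = e.1 := by
    intro e he
    have h1 : e ∈ (PySem.Dict.counter stream).items := (PySem.List.mem_sorted _ _ _ _).mp he
    rw [PySem.Dict.items_counter] at h1
    obtain ⟨k, hk, rfl⟩ := List.mem_map.mp h1
    have hks : k ∈ stream := (PySem.Set.mem_ofList _ _).mp hk
    obtain ⟨l, _, hl⟩ := List.mem_flatMap.mp hks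
    exact tok_fix_one l k hl
  have hci := PySem.List.foldl_congr_mem
    (l := T)
    (f := fun (st : PySem.Dict String Int × PySem.Dict Int String × Int) e =>
      (st.1.insert (PySem.Str.strip e.1) st.2.2, st.2.1.insert st.2.2 (PySem.Str.strip e.1),
        st.2.2 + 1))
    (g := fun (st : PySem.Dict String Int × PySem.Dict Int String × Int) e =>
      (st.1.insert e.1 st.2.2, st.2.1.insert st.2.2 e.1, st.2.2 + 1))
    (init := (((PySem.Dict.empty.insert "<unk>" (0 : Int)).insert "<eos>" 1).insert "<bos>" 2,
      ((PySem.Dict.empty.insert (0 : Int) "<unk>").insert 1 "<eos>").insert 2 "<bos>", (3 : Int)))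
    (by intro acc x hx; simp only [hfix x hx])
  rw [hci]
  have hlit1 : ((PySem.Dict.empty.insert "<unk>" (0 : Int)).insert "<eos>" 1).insert "<bos>" 2
      = PySem.Dict.ofList [("<unk>", 0), ("<eos>", 1), ("<bos>", 2)] := by decide
  have hlit2 : ((PySem.Dict.empty.insert (0 : Int) "<unk>").insert 1 "<eos>").insert 2 "<bos>"
      = PySem.Dict.ofList [(0, "<unk>"), (1, "<eos>"), (2, "<bos>")] := by decide
  rw [hlit1, hlit2, enumFold]
  rfl
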